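-- pv_equiv track=rewrite | github.com/kirillprotsenko03/infolaba | encoding.py | ders_crypt
-- ===== SOURCE A (Python) =====
-- def convert(number, old_base, new_base):
--     number = str(number)
--     amount = 0
--     res = []
--     for i in range(len(number)):
--         amount += int(number[i]) * (old_base ** (len(number) - i - 1))
--     while amount:
--         res.append(amount % new_base)
--         amount //= new_base
--     return res[::-1]
--
-- def permutation(number, position):
--     key = 1
--     for i in range(1, len(number), 2 * position):
--         for j in range(i, i + position):
--             if i + 2 * position >= len(number):
--                 key = 0
--                 break
--             number[j], number[j + position] = number[j + position], number[j]
--         if i + 2 * position >= len(number) or key == 0: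
--             break
--     return number
--
-- def ders_crypt(word):
--     letters_code = []
--     result = []
--     temp1 = []
--     temp2 = []
--     for letter in word:
--         letters_code.append(ord(letter))
--
--     for i in range(len(letters_code)):
--         if i % 2 == 1:
--             temp1.append(permutation(convert(letters_code[i] + 1306, 10, 2), i + 1))
--         else:
--             temp1.append(permutation(convert(letters_code[i] + 1306, 10, 3), i + 1))
--
--     for i in range(len(temp1)):
--         temp2.append(int(''.join(map(str, temp1[i]))))
--
--     for i in range(len(temp1)):
--         if i % 2 == 1:
--             temp1[i] = convert(temp2[i], 2, 10)
--         else: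
--             temp1[i] = convert(temp2[i], 3, 10)
--
--     for i in range(len(temp1)):
--         result.append(int(''.join(map(str, temp1[i]))) - 1306)
--         result.append('.')
--
--     result = ''.join(map(str, result))
--
--     return result
-- ===== SOURCE B (Python) =====
-- # Same encoder, but purely arithmetic: the decimal-string round trips of A cancel
-- # (int(join(digits)) then reinterpreting in the same base is a Horner evaluation),
-- # so each character is encoded in one pass with no string<->int conversions.
--
-- def _digits(n, base):
--     # digits of n (n > 0) in `base`, most significant first; [] for 0
--     return _digits(n // base, base) + [n % base] if n else []
--
-- def _horner(ds, base):
--     v = 0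
--     for d in ds:
--         v = v * base + d
--     return v
--
-- def _permute(ds, p):
--     # swap adjacent p-blocks starting at index 1 while a full pair fits strictly
--     # before the end (exactly the pairs A's in-place permutation swaps)
--     n = len(ds)
--     i = 1
--     while i + 2 * p < n:
--         ds = ds[:i] + ds[i + p:i + 2 * p] + ds[i:i + p] + ds[i + 2 * p:]
--         i += 2 * p
--     return ds
--
-- def ders_crypt(word):
--     out = []
--     for i, ch in enumerate(word):
--         base = 2 if i % 2 else 3
--         ds = _digits(ord(ch) + 1306, base)
--         out.append(str(_horner(_permute(ds, i + 1), base) - 1306) + '.')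
--     return ''.join(out)
-- ===== Notes on version B (the rewrite author's own statement) =====
-- stated objective: faster
-- what changed: B replaces A's four sequential list passes, decimal-string round trips (str/join/int) and in-place index-swap permutation by a single pass per character using pure arithmetic: recursive digit extraction, a slice-based block permutation, and a Horner evaluation under which the int->str->int conversions cancel.
import Mathlib
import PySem

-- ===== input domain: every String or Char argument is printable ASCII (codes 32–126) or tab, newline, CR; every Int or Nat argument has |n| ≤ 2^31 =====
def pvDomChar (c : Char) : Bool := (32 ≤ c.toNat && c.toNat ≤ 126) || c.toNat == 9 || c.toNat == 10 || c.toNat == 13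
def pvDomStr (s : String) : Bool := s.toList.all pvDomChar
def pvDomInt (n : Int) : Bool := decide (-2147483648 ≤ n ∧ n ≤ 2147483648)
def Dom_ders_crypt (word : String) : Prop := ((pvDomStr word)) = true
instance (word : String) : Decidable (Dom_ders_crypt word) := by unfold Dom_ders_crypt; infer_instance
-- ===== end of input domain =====

-- B rewrites the encoder arithmetically (Horner evaluation and a pure slice-based block
-- permutation) instead of A's decimal-string round trips and in-place index swaps.

-- ===== PORT A =====

-- 'while amount: res.append(amount % nb); amount //= nb', low digit first.
-- fuel and the '0 < amount ∧ 2 ≤ new_base' test are totality guards only: at every call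
-- site amount ≥ 0 and new_base ∈ {2,3,10}, so amount.toNat strictly decreases and
-- amount.toNat + 1 fuel is never exhausted (Python's guard is 'amount != 0').
def convWhileA (fuel : Nat) (new_base : Int) (amount : Int) : List Int :=
  match fuel with
  | 0 => []
  | fuel + 1 =>
    if 0 < amount ∧ 2 ≤ new_base then
      PySem.Int.mod amount new_base ::
        convWhileA fuel new_base (PySem.Int.floordiv amount new_base)
    else []

def convertA (number old_base new_base : Int) : List Int :=
  let s := PySem.Int.toChars number          -- number = str(number)
  -- amount += int(number[i]) * old_base ** (len(number) - i - 1)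
  -- (the exponent is a nonnegative int because i < len(number))
  let amount := (PySem.List.pyRange 0 (s.length : Int) 1).foldl
    (fun a i =>
      a + (PySem.Int.ofChars? [PySem.List.pyGetD s i ' ']).getD 0 *
            old_base ^ (((s.length : Int) - i - 1).toNat)) 0
  (convWhileA (amount.toNat + 1) new_base amount).reverse   -- res[::-1]

-- number[j], number[j+position] = number[j+position], number[j]
def swapA (xs : List Int) (j p : Int) : List Int :=
  let a := PySem.List.pyGetD xs j 0
  let b := PySem.List.pyGetD xs (j + p) 0
  PySem.List.pySetD (PySem.List.pySetD xs j b) (j + p) a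

-- for j in range(i, i + position): if i + 2*position >= len(number): key = 0; break; swap
def permInnerA (i p : Int) (js : List Int) (number : List Int) (key : Int) :
    List Int × Int :=
  match js with
  | [] => (number, key)
  | j :: rest =>
    if ((number.length : Int)) ≤ i + 2 * p then (number, 0)
    else permInnerA i p rest (swapA number j p) key

-- for i in range(1, len(number), 2*position): … ;
-- if i + 2*position >= len(number) or key == 0: break
def permOuterA (p : Int) (idxs : List Int) (number : List Int) (key : Int) : List Int :=
  match idxs with
  | [] => number
  | i :: rest =>
    let st := permInnerA i p (PySem.List.pyRange i (i + p) 1) number key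
    if ((st.1.length : Int)) ≤ i + 2 * p ∨ st.2 = 0 then st.1
    else permOuterA p rest st.1 st.2

def permutationA (number : List Int) (position : Int) : List Int :=
  permOuterA position (PySem.List.pyRange 1 (number.length : Int) (2 * position)) number 1

-- int(''.join(map(str, ds)))  (never raises at its call sites: ds is never empty there)
def joinIntA (ds : List Int) : Int :=
  (PySem.Int.ofChars? ((ds.map PySem.Int.toChars).flatten)).getD 0

def ders_crypt (word : String) : String :=
  let letters_code : List Int :=
    word.toList.foldl (fun acc c => acc ++ [(c.toNat : Int)]) []
  let temp1 : List (List Int) :=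
    (PySem.List.pyRange 0 (letters_code.length : Int) 1).foldl (fun acc i =>
      acc ++ [if PySem.Int.mod i 2 = 1
              then permutationA (convertA (PySem.List.pyGetD letters_code i 0 + 1306) 10 2) (i + 1)
              else permutationA (convertA (PySem.List.pyGetD letters_code i 0 + 1306) 10 3) (i + 1)]) []
  let temp2 : List Int :=
    (PySem.List.pyRange 0 (temp1.length : Int) 1).foldl (fun acc i =>
      acc ++ [joinIntA (PySem.List.pyGetD temp1 i [])]) []
  let temp1' : List (List Int) :=
    (PySem.List.pyRange 0 (temp1.length : Int) 1).foldl (fun t i =>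
      PySem.List.pySetD t i (if PySem.Int.mod i 2 = 1
        then convertA (PySem.List.pyGetD temp2 i 0) 2 10
        else convertA (PySem.List.pyGetD temp2 i 0) 3 10)) temp1
  -- result alternates ints and '.'; ''.join(map(str, result)) renders each int via str
  let result : List Char :=
    (PySem.List.pyRange 0 (temp1'.length : Int) 1).foldl (fun acc i =>
      acc ++ (PySem.Int.toChars (joinIntA (PySem.List.pyGetD temp1' i []) - 1306) ++ ['.'])) []
  String.mk result

-- ===== PORT B =====

-- _digits(n, base), recursive, most significant digit first. fuel and the
-- '0 < n ∧ 2 ≤ base' test are totality guards only: n ≥ 0 and base ∈ {2,3} at every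
-- call site, so n.toNat strictly decreases and n.toNat + 1 fuel is never exhausted.
def digitsBGo (fuel : Nat) (n base : Int) : List Int :=
  match fuel with
  | 0 => []
  | fuel + 1 =>
    if 0 < n ∧ 2 ≤ base then
      digitsBGo fuel (PySem.Int.floordiv n base) base ++ [PySem.Int.mod n base]
    else []

def digitsB (n base : Int) : List Int := digitsBGo (n.toNat + 1) n base

def hornerB (ds : List Int) (base : Int) : Int :=
  ds.foldl (fun v d => v * base + d) 0

-- while i + 2*p < n: ds = ds[:i] + ds[i+p:i+2p] + ds[i:i+p] + ds[i+2p:]; i += 2*p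
-- fuel and the '1 ≤ p' test are totality guards only: p = i+1 ≥ 1 at every call site,
-- so (n - i).toNat strictly decreases and (n - i).toNat + 1 fuel is never exhausted.
def permLoopB (fuel : Nat) (n p : Int) (i : Int) (ds : List Int) : List Int :=
  match fuel with
  | 0 => ds
  | fuel + 1 =>
    if i + 2 * p < n ∧ 1 ≤ p then
      permLoopB fuel n p (i + 2 * p)
        (PySem.List.slice ds none (some i) ++
         PySem.List.slice ds (some (i + p)) (some (i + 2 * p)) ++
         PySem.List.slice ds (some i) (some (i + p)) ++
         PySem.List.slice ds (some (i + 2 * p)) none)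
    else ds

def permuteB (ds : List Int) (p : Int) : List Int :=
  permLoopB (((ds.length : Int) - 1).toNat + 1) (ds.length : Int) p 1 ds

def ders_crypt_alt (word : String) : String :=
  String.mk (((PySem.List.enumerate word.toList).map (fun ic =>
    let base : Int := if PySem.Int.mod ic.1 2 = 0 then 3 else 2   -- 2 if i % 2 else 3
    let ds := digitsB ((ic.2.toNat : Int) + 1306) base
    PySem.Int.toChars (hornerB (permuteB ds (ic.1 + 1)) base - 1306) ++ ['.'])).flatten)

-- ===== PRECONDITION & SPEC =====
def Spec_ders_crypt (word : String) (out : String) : Prop := out = ders_crypt_alt word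
instance (word : String) (out : String) : Decidable (Spec_ders_crypt word out) := by unfold Spec_ders_crypt; infer_instance

-- ===== CLAIM (what is proved, stated in full; the proofs are below) =====
def Claim_equal_ders_crypt : Prop := ∀ (word : String), Dom_ders_crypt word → Spec_ders_crypt word (ders_crypt word)

-- ===== LEMMAS AND PROOFS =====

-- A's per-character chunk, as a function of the index and the character code
def chunkAN (k : Nat) (nc : Nat) : List Char :=
  let t1 := if PySem.Int.mod (k : Int) 2 = 1
            then permutationA (convertA ((nc : Int) + 1306) 10 2) ((k : Int) + 1)
            else permutationA (convertA ((nc : Int) + 1306) 10 3) ((k : Int) + 1)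
  let t1' := if PySem.Int.mod (k : Int) 2 = 1
             then convertA (joinIntA t1) 2 10
             else convertA (joinIntA t1) 3 10
  PySem.Int.toChars (joinIntA t1' - 1306) ++ ['.']

-- B's per-character chunk, likewise
def chunkBN (k : Nat) (nc : Nat) : List Char :=
  let base : Int := if PySem.Int.mod (k : Int) 2 = 0 then 3 else 2
  let ds := digitsB ((nc : Int) + 1306) base
  PySem.Int.toChars (hornerB (permuteB ds ((k : Int) + 1)) base - 1306) ++ ['.']

-- a loop writing f k at every index k is a map
theorem foldl_set_range {α : Type} (f : Nat → α) :
    ∀ (n : Nat) (xs : List α), n ≤ xs.length →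
      (List.range n).foldl (fun t k => t.set k (f k)) xs =
        ((List.range n).map f) ++ xs.drop n := by
  intro n
  induction n with
  | zero => intro xs _; simp
  | succ n ih =>
    intro xs h
    rw [List.range_succ, List.foldl_append, List.foldl_cons, List.foldl_nil,
        ih xs (by omega)]
    have hlt : n < xs.length := by omega
    rw [List.drop_eq_getElem_cons hlt]
    rw [List.map_append, List.map_cons, List.map_nil]
    have hlen : (List.map f (List.range n)).length = n := by simp
    rw [List.set_append]
    simp only [hlen, lt_irrefl, if_false, Nat.sub_self]
    rw [List.set_cons_zero]
    simp

theorem A_norm (word : String) :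
    ders_crypt word =
      String.mk (((List.range word.toList.length).map
        (fun k => chunkAN k ((word.toList.getD k 'a').toNat))).flatten) := by
  simp only [ders_crypt]
  simp only [PySem.List.foldl_append_singleton_eq_map, List.nil_append]
  simp only [List.length_map, PySem.List.pyRange_zero_natCast, List.map_map,
    List.length_range]
  simp only [List.foldl_map]
  simp only [PySem.List.pySetD_natCast]
  rw [foldl_set_range _ _ _ (by simp)]
  rw [List.drop_eq_nil_of_le (by simp), List.append_nil]
  rw [PySem.List.foldl_append_eq_flatMap]
  simp only [List.nil_append, List.flatMap_def, List.length_map, List.length_range]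
  refine congrArg String.mk (congrArg List.flatten ?_)
  apply List.map_congr_left
  intro k hk
  rw [List.mem_range] at hk
  have hget2 : ∀ {α : Type} (F : Nat → α) (d : α),
      PySem.List.pyGetD ((List.range word.toList.length).map F) ((k : Int)) d = F k := by
    intro α F d
    rw [PySem.List.pyGetD_natCast]
    exact PySem.List.getD_map_range _ _ _ _ hk
  have hlc : PySem.List.pyGetD (word.toList.map (fun c => (c.toNat : Int))) ((k : Int)) 0
      = ((word.toList.getD k 'a').toNat : Int) := by
    rw [PySem.List.pyGetD_natCast,
        List.getD_eq_getElem _ _ (by simpa using hk), List.getElem_map,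
        ← List.getD_eq_getElem _ _ hk]
  simp only [hget2, hlc, Function.comp]
  simp only [chunkAN]

theorem B_norm (word : String) :
    ders_crypt_alt word =
      String.mk (((List.range word.toList.length).map
        (fun k => chunkBN k ((word.toList.getD k 'a').toNat))).flatten) := by
  simp only [ders_crypt_alt]
  rw [PySem.List.enumerate_eq_map_pyRange (d := 'a')]
  simp only [PySem.List.len, PySem.List.pyRange_zero_natCast, List.map_map]
  refine congrArg String.mk (congrArg List.flatten ?_)
  apply List.map_congr_left
  intro k hk
  rw [List.mem_range] at hk
  simp only [Function.comp, PySem.List.pyGetD_natCast, chunkBN]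

-- A's in-place permutation touches nothing once a full pair of blocks no longer fits
theorem permutationA_id (number : List Int) (p : Int) (hp : 1 ≤ p)
    (h : (number.length : Int) ≤ 1 + 2 * p) : permutationA number p = number := by
  unfold permutationA
  rcases hE : PySem.List.pyRange 1 (number.length : Int) (2 * p) with _ | ⟨i, rest⟩
  · rfl
  · have hi : 1 ≤ i := by
      have hm : i ∈ PySem.List.pyRange 1 (number.length : Int) (2 * p) := by
        rw [hE]; exact List.mem_cons_self
      have := (PySem.List.mem_pyRange_iff_of_pos (by omega) i).mp hm
      omega
    have hcond : (number.length : Int) ≤ i + 2 * p := by omega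
    rcases hJ : PySem.List.pyRange i (i + p) 1 with _ | ⟨j, js⟩
    · simp [permOuterA, permInnerA, hJ, hcond]
    · simp [permOuterA, permInnerA, hJ, hcond]

-- B's slice permutation likewise
theorem permLoopB_id (fuel : Nat) (n p i : Int) (ds : List Int)
    (h : ¬ (i + 2 * p < n)) : permLoopB fuel n p i ds = ds := by
  cases fuel with
  | zero => rfl
  | succ fuel => simp [permLoopB, h]

set_option maxRecDepth 8192 in
set_option maxHeartbeats 2000000 in
theorem lenA2 : ∀ nc : Nat, nc < 127 → (convertA ((nc : Int) + 1306) 10 2).length ≤ 11 := by decide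
set_option maxRecDepth 8192 in
set_option maxHeartbeats 2000000 in
theorem lenA3 : ∀ nc : Nat, nc < 127 → (convertA ((nc : Int) + 1306) 10 3).length ≤ 7 := by decide
set_option maxRecDepth 8192 in
set_option maxHeartbeats 2000000 in
theorem lenB2 : ∀ nc : Nat, nc < 127 → (digitsB ((nc : Int) + 1306) 2).length ≤ 11 := by decide
set_option maxRecDepth 8192 in
set_option maxHeartbeats 2000000 in
theorem lenB3 : ∀ nc : Nat, nc < 127 → (digitsB ((nc : Int) + 1306) 3).length ≤ 7 := by decide

set_option maxRecDepth 8192 in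
set_option maxHeartbeats 2000000 in
theorem fixA2 : ∀ nc : Nat, nc < 127 → 9 ≤ nc →
    joinIntA (convertA (joinIntA (convertA ((nc : Int) + 1306) 10 2)) 2 10) - 1306 = (nc : Int) := by decide
set_option maxRecDepth 8192 in
set_option maxHeartbeats 2000000 in
theorem fixA3 : ∀ nc : Nat, nc < 127 → 9 ≤ nc →
    joinIntA (convertA (joinIntA (convertA ((nc : Int) + 1306) 10 3)) 3 10) - 1306 = (nc : Int) := by decide
set_option maxRecDepth 8192 in
set_option maxHeartbeats 2000000 in
theorem fixB2 : ∀ nc : Nat, nc < 127 → 9 ≤ nc →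
    hornerB (digitsB ((nc : Int) + 1306) 2) 2 - 1306 = (nc : Int) := by decide
set_option maxRecDepth 8192 in
set_option maxHeartbeats 2000000 in
theorem fixB3 : ∀ nc : Nat, nc < 127 → 9 ≤ nc →
    hornerB (digitsB ((nc : Int) + 1306) 3) 3 - 1306 = (nc : Int) := by decide

set_option maxRecDepth 8192 in
set_option maxHeartbeats 2000000 in
theorem chunk_eq0 : ∀ n < 127, 9 ≤ n → chunkAN 0 n = chunkBN 0 n := by decide

set_option maxRecDepth 8192 in
set_option maxHeartbeats 2000000 in
theorem chunk_eq1 : ∀ n < 127, 9 ≤ n → chunkAN 1 n = chunkBN 1 n := by decide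

set_option maxRecDepth 8192 in
set_option maxHeartbeats 2000000 in
theorem chunk_eq2 : ∀ n < 127, 9 ≤ n → chunkAN 2 n = chunkBN 2 n := by decide

set_option maxRecDepth 8192 in
set_option maxHeartbeats 2000000 in
theorem chunk_eq3 : ∀ n < 127, 9 ≤ n → chunkAN 3 n = chunkBN 3 n := by decide

theorem chunk_eq (k : Nat) (nc : Nat) (h9 : 9 ≤ nc) (h126 : nc ≤ 126) :
    chunkAN k nc = chunkBN k nc := by
  match k with
  | 0 => exact chunk_eq0 nc (by omega) h9
  | 1 => exact chunk_eq1 nc (by omega) h9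
  | 2 => exact chunk_eq2 nc (by omega) h9
  | 3 => exact chunk_eq3 nc (by omega) h9
  | (m + 4) =>
    have hnc : nc < 127 := by omega
    have hmod : PySem.Int.mod (((m + 4 : Nat) : Int)) 2 = ((m % 2 : Nat) : Int) := by
      have h1 := PySem.Int.mod_natCast (m + 4) 2
      have h2 : (m + 4) % 2 = m % 2 := by omega
      rw [h2] at h1
      exact_mod_cast h1
    unfold chunkAN chunkBN
    rcases Nat.even_or_odd m with he | ho
    · have hp : m % 2 = 0 := Nat.even_iff.mp he
      rw [hmod, hp]
      norm_num
      rw [permutationA_id _ _ (by omega)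
          (by have := lenA3 nc hnc; omega)]
      rw [fixA3 nc hnc h9]
      unfold permuteB
      rw [permLoopB_id _ _ _ _ _ (by have := lenB3 nc hnc; omega)]
      rw [fixB3 nc hnc h9]
    · have hp : m % 2 = 1 := Nat.odd_iff.mp ho
      rw [hmod, hp]
      norm_num
      rw [permutationA_id _ _ (by omega)
          (by have := lenA2 nc hnc; omega)]
      rw [fixA2 nc hnc h9]
      unfold permuteB
      rw [permLoopB_id _ _ _ _ _ (by have := lenB2 nc hnc; omega)]
      rw [fixB2 nc hnc h9]

-- ===== VERDICT (by name: the statement is the Claim_ definition above) =====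
theorem ders_crypt_spec : Claim_equal_ders_crypt := by
  intro word hdom
  unfold Spec_ders_crypt
  rw [A_norm, B_norm]
  refine congrArg String.mk (congrArg List.flatten ?_)
  apply List.map_congr_left
  intro k hk
  rw [List.mem_range] at hk
  have hc : pvDomChar (word.toList.getD k 'a') = true := by
    rw [List.getD_eq_getElem _ _ hk]
    have hall : word.toList.all pvDomChar = true := hdom
    exact List.all_eq_true.mp hall _ (List.getElem_mem hk)
  simp only [pvDomChar, Bool.or_eq_true, Bool.and_eq_true, decide_eq_true_eq,
    beq_iff_eq] at hc
  exact chunk_eq k _ (by omega) (by omega)
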